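-- pv_equiv track=rewrite | github.com/Cynric-Ni/big-data-visualization | src/NW.py | _count_wy_analysis
-- ===== SOURCE A (Python) =====
-- def _count_wy_analysis(rows):
--     """统计外业分析数据"""
--     counts = {'excellent': 0, 'good': 0, 'average': 0, 'poor': 0}
--     for row in rows:
--         wy_analysis = row.get("WY-analysis")
--         if wy_analysis:
--             if wy_analysis >= 8:
--                 counts['excellent'] += 1
--             elif wy_analysis >= 4:
--                 counts['good'] += 1
--             elif wy_analysis >= 2:
--                 counts['average'] += 1
--             else:
--                 counts['poor'] += 1
--     return counts
-- ===== SOURCE B (Python) =====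
-- def _count_wy_analysis(rows):
--     """统计外业分析数据"""
--     vals = [v for v in (row.get("WY-analysis") for row in rows) if v]
--     return {
--         'excellent': sum(1 for v in vals if v >= 8),
--         'good':      sum(1 for v in vals if 4 <= v < 8),
--         'average':   sum(1 for v in vals if 2 <= v < 4),
--         'poor':      sum(1 for v in vals if v < 2),
--     }
-- ===== Notes on version B (the rewrite author's own statement) =====
-- stated objective: idiomatic
-- what changed: Staged passes instead of a single mutating loop: first collect the truthy WY-analysis values, then compute each of the four counts with an independent counting pass over disjoint ranges, building the result dict once as a literal.
import Mathlib
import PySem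

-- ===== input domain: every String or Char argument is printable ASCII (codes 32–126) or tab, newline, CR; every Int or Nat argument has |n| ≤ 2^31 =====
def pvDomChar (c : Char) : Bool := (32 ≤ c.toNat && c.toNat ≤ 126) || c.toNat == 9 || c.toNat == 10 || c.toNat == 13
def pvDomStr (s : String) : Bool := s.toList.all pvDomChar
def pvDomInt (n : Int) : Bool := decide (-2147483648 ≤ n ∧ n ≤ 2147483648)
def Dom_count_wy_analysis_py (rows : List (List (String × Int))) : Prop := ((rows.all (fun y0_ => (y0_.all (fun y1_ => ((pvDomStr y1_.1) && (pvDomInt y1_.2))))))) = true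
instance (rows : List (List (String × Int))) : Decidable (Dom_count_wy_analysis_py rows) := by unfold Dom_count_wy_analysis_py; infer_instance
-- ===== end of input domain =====

-- B computes the four buckets in staged independent counting passes over the pre-filtered value list instead of A's single mutating-dict loop; same O(n) cost.

-- ===== PORT A =====
-- one loop iteration of A: row.get, truthiness test, the >=-cascade incrementing the dict in place
def pvStepA (counts : PySem.Dict String Int) (row : List (String × Int)) : PySem.Dict String Int :=
  match (PySem.Dict.ofList row).get? "WY-analysis" with
  | none => counts
  | some wy =>
    if wy ≠ 0 then  -- `if wy_analysis:` truthiness on an int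
      if wy ≥ 8 then counts.modify "excellent" 0 (· + 1)
      else if wy ≥ 4 then counts.modify "good" 0 (· + 1)
      else if wy ≥ 2 then counts.modify "average" 0 (· + 1)
      else counts.modify "poor" 0 (· + 1)
    else counts

def count_wy_analysis_py (rows : List (List (String × Int))) : List (String × Int) :=
  (rows.foldl pvStepA (PySem.Dict.ofList [("excellent", 0), ("good", 0), ("average", 0), ("poor", 0)])).items

-- ===== PORT B =====
-- vals = [v for v in (row.get("WY-analysis") for row in rows) if v]  (None and 0 are falsy)
def pvVals (rows : List (List (String × Int))) : List Int :=
  (rows.map (fun row => (PySem.Dict.ofList row).get? "WY-analysis")).filterMap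
    (fun v => match v with
      | some wy => if wy ≠ 0 then some wy else none
      | none => none)

-- the dict literal: each value is an independent counting pass (`sum(1 for v in vals if …)`)
def count_wy_analysis_py_alt (rows : List (List (String × Int))) : List (String × Int) :=
  let vals := pvVals rows
  [("excellent", ((vals.countP (fun v => decide (8 ≤ v)) : Nat) : Int)),
   ("good",      ((vals.countP (fun v => decide (4 ≤ v ∧ v < 8)) : Nat) : Int)),
   ("average",   ((vals.countP (fun v => decide (2 ≤ v ∧ v < 4)) : Nat) : Int)),
   ("poor",      ((vals.countP (fun v => decide (v < 2)) : Nat) : Int))]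

-- ===== PRECONDITION & SPEC =====
def Spec_count_wy_analysis_py (rows : List (List (String × Int))) (out : List (String × Int)) : Prop := out = count_wy_analysis_py_alt rows
instance (rows : List (List (String × Int))) (out : List (String × Int)) : Decidable (Spec_count_wy_analysis_py rows out) := by unfold Spec_count_wy_analysis_py; infer_instance

-- ===== CLAIM (what is proved, stated in full; the proofs are below) =====
def Claim_equal_count_wy_analysis_py : Prop := ∀ (rows : List (List (String × Int))), Dom_count_wy_analysis_py rows → Spec_count_wy_analysis_py rows (count_wy_analysis_py rows)

-- ===== LEMMAS AND PROOFS =====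

-- loop invariant: A's dict after the fold carries each start counter plus the corresponding range count of the remaining values
lemma pv_main (rows : List (List (String × Int))) (p a g e : Int) :
    (rows.foldl pvStepA (PySem.Dict.ofList [("excellent", e), ("good", g), ("average", a), ("poor", p)])).items
      = [("excellent", e + ((pvVals rows).countP (fun v => decide (8 ≤ v)) : Nat)),
         ("good",      g + ((pvVals rows).countP (fun v => decide (4 ≤ v ∧ v < 8)) : Nat)),
         ("average",   a + ((pvVals rows).countP (fun v => decide (2 ≤ v ∧ v < 4)) : Nat)),
         ("poor",      p + ((pvVals rows).countP (fun v => decide (v < 2)) : Nat))] := by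
  induction rows generalizing p a g e with
  | nil => simp [pvVals]; rfl
  | cons row rest ih =>
    simp only [List.foldl_cons]
    rcases h : (PySem.Dict.ofList row).get? "WY-analysis" with _ | wy
    · have hv : pvVals (row :: rest) = pvVals rest := by
        simp [pvVals, h]
      simp only [pvStepA, h, hv]
      exact ih p a g e
    · by_cases h0 : wy = 0
      · have hv : pvVals (row :: rest) = pvVals rest := by
          simp [pvVals, h, h0]
        simp only [pvStepA, h, h0, ne_eq, not_true_eq_false, if_false, hv]
        exact ih p a g e
      · have hv : pvVals (row :: rest) = wy :: pvVals rest := by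
          simp [pvVals, h, h0]
        rw [hv]
        rcases lt_or_ge wy 8 with h8 | h8
        · rcases lt_or_ge wy 4 with h4 | h4
          · rcases lt_or_ge wy 2 with h2 | h2
            · -- wy < 2: 'poor'
              have hA : pvStepA (PySem.Dict.ofList [("excellent", e), ("good", g), ("average", a), ("poor", p)]) row
                  = PySem.Dict.ofList [("excellent", e), ("good", g), ("average", a), ("poor", p + 1)] := by
                simp only [pvStepA, h]
                rw [if_pos h0, if_neg (show ¬(wy ≥ 8) from by omega), if_neg (show ¬(wy ≥ 4) from by omega), if_neg (show ¬(wy ≥ 2) from by omega)]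
                rfl
              rw [hA, ih]
              simp [List.countP_cons, show ¬(8 ≤ wy) from by omega, show ¬(4 ≤ wy ∧ wy < 8) from by omega, show ¬(2 ≤ wy ∧ wy < 4) from by omega]
              omega
            · -- 2 ≤ wy < 4: 'average'
              have hA : pvStepA (PySem.Dict.ofList [("excellent", e), ("good", g), ("average", a), ("poor", p)]) row
                  = PySem.Dict.ofList [("excellent", e), ("good", g), ("average", a + 1), ("poor", p)] := by
                simp only [pvStepA, h]
                rw [if_pos h0, if_neg (show ¬(wy ≥ 8) from by omega), if_neg (show ¬(wy ≥ 4) from by omega), if_pos (show (wy ≥ 2) from by omega)]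
                rfl
              rw [hA, ih]
              simp [List.countP_cons, show ¬(8 ≤ wy) from by omega, show ¬(4 ≤ wy ∧ wy < 8) from by omega, show (2 ≤ wy ∧ wy < 4) from by omega]
              omega
          · -- 4 ≤ wy < 8: 'good'
            have hA : pvStepA (PySem.Dict.ofList [("excellent", e), ("good", g), ("average", a), ("poor", p)]) row
                = PySem.Dict.ofList [("excellent", e), ("good", g + 1), ("average", a), ("poor", p)] := by
              simp only [pvStepA, h]
              rw [if_pos h0, if_neg (show ¬(wy ≥ 8) from by omega), if_pos (show (wy ≥ 4) from by omega)]
              rfl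
            rw [hA, ih]
            simp [List.countP_cons, show ¬(8 ≤ wy) from by omega, show (4 ≤ wy ∧ wy < 8) from by omega, show ¬(2 ≤ wy ∧ wy < 4) from by omega]
            omega
        · -- 8 ≤ wy: 'excellent'
          have hA : pvStepA (PySem.Dict.ofList [("excellent", e), ("good", g), ("average", a), ("poor", p)]) row
              = PySem.Dict.ofList [("excellent", e + 1), ("good", g), ("average", a), ("poor", p)] := by
            simp only [pvStepA, h]
            rw [if_pos h0, if_pos (show (wy ≥ 8) from by omega)]
            rfl
          rw [hA, ih]
          simp [List.countP_cons, show (8 ≤ wy) from by omega, show ¬(4 ≤ wy ∧ wy < 8) from by omega, show ¬(2 ≤ wy ∧ wy < 4) from by omega]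
          omega

-- ===== VERDICT (by name: the statement is the Claim_ definition above) =====
theorem count_wy_analysis_py_spec : Claim_equal_count_wy_analysis_py := by
  intro rows _
  show count_wy_analysis_py rows = count_wy_analysis_py_alt rows
  rw [count_wy_analysis_py, pv_main]
  simp [count_wy_analysis_py_alt]
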